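-- pv_equiv track=rewrite | github.com/victorlee079/leetcode | oa/shoppingoptions.py | solution
-- ===== SOURCE A (Python) =====
-- import bisect
--
-- def solution(pricesOfJeans, pricesOfShoes, pricesOfSkirts, pricesOfTops, budget):
--     pair_a = []
--     for a in pricesOfJeans:
--         for b in pricesOfShoes:
--             if a + b < budget:
--                 pair_a.append(a + b)
--
--     pair_b = []
--     for a in pricesOfSkirts:
--         for b in pricesOfTops:
--             if a + b < budget:
--                 pair_b.append(a + b)
--
--     if len(pair_a) > len(pair_b):
--         pair_a, pair_b = pair_b, pair_a
--
--     pair_b.sort()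
--
--     res = 0
--     for i in pair_a:
--         k = budget - i
--         idx = bisect.bisect_right(pair_b, k)
--         if idx != -1:
--             res += idx
--     return res
-- ===== SOURCE B (Python) =====
-- def solution(pricesOfJeans, pricesOfShoes, pricesOfSkirts, pricesOfTops, budget):
--     pair_a = sorted(a + b for a in pricesOfJeans for b in pricesOfShoes if a + b < budget)
--     cur = sorted(a + b for a in pricesOfSkirts for b in pricesOfTops if a + b < budget)
--     res = 0
--     for x in pair_a:
--         while cur and cur[-1] > budget - x:
--             cur.pop()
--         res += len(cur)
--     return res
-- ===== Notes on version B (the rewrite author's own statement) =====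
-- stated objective: alternative
-- what changed: Replaces A's length-based swap plus per-element binary search (bisect_right) over one sorted pair-sum list by sorting both pair-sum lists and counting with a single monotone two-pointer sweep that pops the tail of the second list as the first is traversed in ascending order.
import Mathlib
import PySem

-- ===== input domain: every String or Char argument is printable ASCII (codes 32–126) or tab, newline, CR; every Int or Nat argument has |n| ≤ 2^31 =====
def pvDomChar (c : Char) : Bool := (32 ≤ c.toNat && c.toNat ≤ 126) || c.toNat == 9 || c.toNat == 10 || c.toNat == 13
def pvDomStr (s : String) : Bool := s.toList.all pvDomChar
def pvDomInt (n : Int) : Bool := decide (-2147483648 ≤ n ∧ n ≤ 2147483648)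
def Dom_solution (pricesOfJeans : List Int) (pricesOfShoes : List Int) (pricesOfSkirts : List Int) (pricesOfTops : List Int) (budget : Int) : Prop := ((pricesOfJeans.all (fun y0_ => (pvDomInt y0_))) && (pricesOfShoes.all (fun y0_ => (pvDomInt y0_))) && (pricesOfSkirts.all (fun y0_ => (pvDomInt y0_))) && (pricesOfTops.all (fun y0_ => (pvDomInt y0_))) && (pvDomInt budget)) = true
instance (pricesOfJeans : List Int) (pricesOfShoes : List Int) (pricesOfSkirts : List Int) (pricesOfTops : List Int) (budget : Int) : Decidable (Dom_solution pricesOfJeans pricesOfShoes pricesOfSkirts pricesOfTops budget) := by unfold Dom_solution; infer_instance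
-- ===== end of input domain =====

-- B replaces A's length-swap + per-element binary search by sorting both pairwise-sum
-- lists and a single two-pointer sweep (popping from the end); same asymptotic cost
-- (objective: alternative).

-- ===== PORT A =====
-- A: build the two filtered pairwise-sum lists, swap so the shorter is iterated,
-- sort the other, then for each element add bisect_right(pair_b, budget - i).
def solution (pricesOfJeans : List Int) (pricesOfShoes : List Int) (pricesOfSkirts : List Int) (pricesOfTops : List Int) (budget : Int) : Int :=
  let pair_a := pricesOfJeans.foldl (fun acc a =>
    pricesOfShoes.foldl (fun acc b => if a + b < budget then acc ++ [a + b] else acc) acc) []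
  let pair_b := pricesOfSkirts.foldl (fun acc a =>
    pricesOfTops.foldl (fun acc b => if a + b < budget then acc ++ [a + b] else acc) acc) []
  let p := if pair_a.length > pair_b.length then (pair_b, pair_a) else (pair_a, pair_b)
  let pb := PySem.List.sorted p.2 (fun x => x) false
  p.1.foldl (fun res i =>
    let k := budget - i
    let idx : Int := (PySem.List.bisectRight pb k : Int)
    if idx ≠ -1 then res + idx else res) 0

-- ===== PORT B =====
-- while cur and cur[-1] > k: cur.pop()
def pvPopWhile (k : Int) (cur : List Int) : List Int :=
  match h : cur.getLast? with
  | some v => if v > k then pvPopWhile k cur.dropLast else cur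
  | none => cur
termination_by cur.length
decreasing_by
  have hne : cur ≠ [] := by intro e; subst e; simp at h
  have : 0 < cur.length := List.length_pos_iff.mpr hne
  simp [List.length_dropLast]; omega

def solution_alt (pricesOfJeans : List Int) (pricesOfShoes : List Int) (pricesOfSkirts : List Int) (pricesOfTops : List Int) (budget : Int) : Int :=
  let pair_a := PySem.List.sorted
    (pricesOfJeans.flatMap (fun a => (pricesOfShoes.filter (fun b => a + b < budget)).map (fun b => a + b)))
    (fun x => x) false
  let cur := PySem.List.sorted
    (pricesOfSkirts.flatMap (fun a => (pricesOfTops.filter (fun b => a + b < budget)).map (fun b => a + b)))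
    (fun x => x) false
  (pair_a.foldl (fun st x =>
      let c := pvPopWhile (budget - x) st.2
      (st.1 + (c.length : Int), c)) ((0 : Int), cur)).1

-- ===== PRECONDITION & SPEC =====
def Spec_solution (pricesOfJeans : List Int) (pricesOfShoes : List Int) (pricesOfSkirts : List Int) (pricesOfTops : List Int) (budget : Int) (out : Int) : Prop := out = solution_alt pricesOfJeans pricesOfShoes pricesOfSkirts pricesOfTops budget
instance (pricesOfJeans : List Int) (pricesOfShoes : List Int) (pricesOfSkirts : List Int) (pricesOfTops : List Int) (budget : Int) (out : Int) : Decidable (Spec_solution pricesOfJeans pricesOfShoes pricesOfSkirts pricesOfTops budget out) := by unfold Spec_solution; infer_instance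

-- ===== CLAIM (what is proved, stated in full; the proofs are below) =====
def Claim_equal_solution : Prop := ∀ (pricesOfJeans : List Int) (pricesOfShoes : List Int) (pricesOfSkirts : List Int) (pricesOfTops : List Int) (budget : Int), Dom_solution pricesOfJeans pricesOfShoes pricesOfSkirts pricesOfTops budget → Spec_solution pricesOfJeans pricesOfShoes pricesOfSkirts pricesOfTops budget (solution pricesOfJeans pricesOfShoes pricesOfSkirts pricesOfTops budget)

-- ===== LEMMAS AND PROOFS =====

-- the common value both programs compute: Σ_{x∈A} #{y∈B | x+y ≤ bud}
def pvF (A B : List Int) (bud : Int) : Int :=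
  (A.map (fun x => (B.countP (fun y => decide (x + y ≤ bud)) : Int))).sum

-- A's nested append loop builds the filtered pairwise-sum list
theorem pv_build_eq (J S : List Int) (bud : Int) (acc0 : List Int) :
    J.foldl (fun acc a => S.foldl (fun acc b => if a + b < bud then acc ++ [a + b] else acc) acc) acc0
      = acc0 ++ J.flatMap (fun a => (S.filter (fun b => a + b < bud)).map (fun b => a + b)) := by
  induction J generalizing acc0 with
  | nil => simp
  | cons a J ih =>
    simp only [List.foldl_cons, List.flatMap_cons]
    rw [PySem.List.foldl_append_ite (fun b => a + b < bud) (fun b => a + b) S acc0, ih]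
    simp [List.append_assoc]

-- bisect_right on an ascending list counts the elements ≤ x
theorem pv_bisect_eq_countP (l : List Int) (hl : l.Pairwise (· ≤ ·)) (x : Int) :
    (PySem.List.bisectRight l x : Int) = (l.countP (fun y => decide (y ≤ x)) : Int) := by
  obtain ⟨h1, h2, h3⟩ := PySem.List.bisectRight_spec l x hl
  set r := PySem.List.bisectRight l x with hr
  have : l.countP (fun y => decide (y ≤ x)) = r := by
    conv_lhs => rw [← List.take_append_drop r l]
    rw [List.countP_append]
    have ht : (l.take r).countP (fun y => decide (y ≤ x)) = (l.take r).length := by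
      apply List.countP_eq_length.mpr
      intro a ha
      obtain ⟨j, hm, hj⟩ := List.mem_take_iff_getElem.mp ha
      have hjl : j < l.length := lt_of_lt_of_le hm (min_le_right _ _)
      have hjr : j < r := lt_of_lt_of_le hm (min_le_left _ _)
      have := h2 j hjl hjr
      rw [hj] at this
      simp [this]
    have hd : (l.drop r).countP (fun y => decide (y ≤ x)) = 0 := by
      apply List.countP_eq_zero.mpr
      intro a ha
      obtain ⟨j, hj, hja⟩ := List.mem_iff_getElem.mp ha
      rw [List.getElem_drop] at hja
      have := h3 (r + j) (by simp at hj; omega) (by omega)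
      simp only [hja] at this
      simp; omega
    rw [ht, hd, List.length_take]
    omega
  omega

-- pop-from-the-end loop on an ascending list = takeWhile (≤ k)
theorem pv_popWhile_eq_takeWhile (k : Int) (l : List Int) (hl : l.Pairwise (· ≤ ·)) :
    pvPopWhile k l = l.takeWhile (fun y => decide (y ≤ k)) := by
  induction hn : l.length using Nat.strong_induction_on generalizing l with
  | _ n ih =>
  subst hn
  rw [pvPopWhile.eq_def]
  split
  · rename_i v hv
    have hne : l ≠ [] := by intro e; subst e; simp at hv
    have hvl : v = l.getLast hne := by
      rw [List.getLast?_eq_some_getLast hne] at hv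
      exact (Option.some.inj hv).symm
    have hsplit : l.dropLast ++ [l.getLast hne] = l := List.dropLast_concat_getLast hne
    have hdl : l.dropLast.Pairwise (· ≤ ·) := List.Pairwise.sublist (List.dropLast_sublist l) hl
    split
    · rename_i hgt
      have hlen : l.dropLast.length < l.length := by
        have : 0 < l.length := List.length_pos_iff.mpr hne
        simp [List.length_dropLast]; omega
      rw [ih l.dropLast.length hlen l.dropLast hdl rfl]
      conv_rhs => rw [← hsplit]
      rw [List.takeWhile_append]
      have hlast : List.takeWhile (fun y => decide (y ≤ k)) [l.getLast hne] = [] := by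
        simp [← hvl]; omega
      split
      · rename_i hall
        rw [hlast, List.append_nil]
        exact List.Sublist.eq_of_length (List.takeWhile_sublist _) hall
      · rfl
    · rename_i hgt
      symm
      apply List.takeWhile_eq_self_iff.mpr
      intro a ha
      have hle : a ≤ l.getLast hne := by
        have ha' : a ∈ l.dropLast ++ [l.getLast hne] := by rw [hsplit]; exact ha
        have hpw : (l.dropLast ++ [l.getLast hne]).Pairwise (· ≤ ·) := by rw [hsplit]; exact hl
        rcases List.mem_append.mp ha' with h1 | h1
        · exact ((List.pairwise_append.mp hpw).2.2 a h1 _ (by simp))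
        · simp at h1; omega
      simp; omega
  · rename_i hv
    have : l = [] := List.getLast?_eq_none_iff.mp hv
    subst this; simp

-- takeWhile of a stronger predicate through takeWhile of a weaker one
theorem pv_takeWhile_mono (p q : Int → Bool) (l : List Int) (h : ∀ a, p a = true → q a = true) :
    (l.takeWhile q).takeWhile p = l.takeWhile p := by
  rw [List.takeWhile_takeWhile]
  congr 1
  funext a
  by_cases hp : p a = true
  · simp [hp, h a hp]
  · simp [hp]

-- on an ascending list, |takeWhile (≤ k)| = countP (≤ k)
theorem pv_takeWhile_length_countP (k : Int) : ∀ (l : List Int), l.Pairwise (· ≤ ·) →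
    (l.takeWhile (fun y => decide (y ≤ k))).length = l.countP (fun y => decide (y ≤ k)) := by
  intro l
  induction l with
  | nil => simp
  | cons a l ih =>
    intro hl
    rw [List.pairwise_cons] at hl
    by_cases hak : a ≤ k
    · simp [hak, ih hl.2]
    · have h0 : l.countP (fun y => decide (y ≤ k)) = 0 :=
        List.countP_eq_zero.mpr (by intro b hb; have := hl.1 b hb; simp; omega)
      simp [hak, h0]

-- B's sweep computes pvF over the sorted lists
theorem pv_loopB (bud : Int) (B0 : List Int) (hB0 : B0.Pairwise (· ≤ ·)) :
    ∀ (A : List Int) (res : Int) (cur : List Int), A.Pairwise (· ≤ ·) → cur.Pairwise (· ≤ ·) →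
    (∀ x ∈ A, cur.takeWhile (fun y => decide (y ≤ bud - x)) = B0.takeWhile (fun y => decide (y ≤ bud - x))) →
    (A.foldl (fun st x =>
        let c := pvPopWhile (bud - x) st.2
        (st.1 + (c.length : Int), c)) (res, cur)).1
      = res + (A.map (fun x => (B0.countP (fun y => decide (y ≤ bud - x)) : Int))).sum := by
  intro A
  induction A with
  | nil => intro res cur _ _ _; simp
  | cons x A ih =>
    intro res cur hA hcur hinv
    rw [List.pairwise_cons] at hA
    have hc : pvPopWhile (bud - x) cur = B0.takeWhile (fun y => decide (y ≤ bud - x)) := by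
      rw [pv_popWhile_eq_takeWhile _ _ hcur, hinv x (by simp)]
    simp only [List.foldl_cons, hc]
    rw [ih _ _ hA.2 (List.Pairwise.sublist (List.takeWhile_sublist _) hB0) ?_]
    · rw [pv_takeWhile_length_countP _ _ hB0]
      simp [List.map_cons, List.sum_cons]
      ring
    · intro x' hx'
      exact pv_takeWhile_mono _ _ B0 (by intro a ha; simp at ha ⊢; have := hA.1 x' hx'; omega)

-- double-counting: the two iteration orders give the same sum
theorem pv_sum_sum_comm (A B : List Int) (e : Int → Int → Int) :
    (A.map (fun x => (B.map (fun y => e x y)).sum)).sum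
      = (B.map (fun y => (A.map (fun x => e x y)).sum)).sum := by
  induction A with
  | nil => simp
  | cons a A ih =>
    simp only [List.map_cons, List.sum_cons, ih]
    rw [← PySem.List.sum_map_add_int]

theorem pv_F_comm (A B : List Int) (bud : Int) : pvF A B bud = pvF B A bud := by
  unfold pvF
  have key : ∀ (L : List Int) (x : Int),
      ((L.countP (fun y => decide (x + y ≤ bud)) : Nat) : Int)
        = (L.map (fun y => if decide (x + y ≤ bud) = true then (1:Int) else 0)).sum :=
    fun L x => (PySem.List.sum_map_ite_one_zero (fun y => decide (x + y ≤ bud)) L).symm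
  calc (A.map (fun x => ((B.countP (fun y => decide (x + y ≤ bud)) : Nat) : Int))).sum
      = (A.map (fun x => (B.map (fun y => if decide (x + y ≤ bud) = true then (1:Int) else 0)).sum)).sum := by
        simp only [key]
    _ = (B.map (fun y => (A.map (fun x => if decide (x + y ≤ bud) = true then (1:Int) else 0)).sum)).sum :=
        pv_sum_sum_comm A B _
    _ = (B.map (fun y => ((A.countP (fun x => decide (x + y ≤ bud)) : Nat) : Int))).sum := by
        simp only [PySem.List.sum_map_ite_one_zero]
    _ = (B.map (fun x => ((A.countP (fun y => decide (x + y ≤ bud)) : Nat) : Int))).sum := by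
        apply congrArg
        apply List.map_congr_left
        intro y _
        congr 1
        exact List.countP_congr (by intro a _; simp; omega)

-- A's counting loop over X, with Y sorted inside, computes pvF X Y
theorem pv_Aloop (X Y : List Int) (bud : Int) :
    X.foldl (fun res i =>
      let k := bud - i
      let idx : Int := (PySem.List.bisectRight (PySem.List.sorted Y (fun x => x) false) k : Int)
      if idx ≠ -1 then res + idx else res) 0 = pvF X Y bud := by
  have hpb : (PySem.List.sorted Y (fun x => x) false).Pairwise (· ≤ ·) :=
    PySem.List.sorted_pairwise Y (fun x => x)
  rw [PySem.List.foldl_congr_mem X _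
    (fun res i => res + ((Y.countP (fun y => decide (i + y ≤ bud)) : Nat) : Int)) 0 ?_]
  · rw [PySem.List.foldl_add]
    unfold pvF
    rw [zero_add]
  · intro acc i _
    simp only []
    rw [if_pos (by omega)]
    rw [pv_bisect_eq_countP _ hpb (bud - i)]
    congr 2
    rw [List.Perm.countP_eq _ (PySem.List.sorted_perm Y (fun x => x) false)]
    exact List.countP_congr (by intro a _; simp; omega)

theorem solution_spec' : ∀ (J S Sk T : List Int) (bud : Int),
    solution J S Sk T bud = solution_alt J S Sk T bud := by
  intro J S Sk T bud
  unfold solution solution_alt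
  simp only [pv_build_eq, List.nil_append]
  set LA := J.flatMap (fun a => (S.filter (fun b => a + b < bud)).map (fun b => a + b)) with hLA
  set LB := Sk.flatMap (fun a => (T.filter (fun b => a + b < bud)).map (fun b => a + b)) with hLB
  have hBside :
      ((PySem.List.sorted LA (fun x => x) false).foldl (fun st x =>
        let c := pvPopWhile (bud - x) st.2
        (st.1 + (c.length : Int), c)) ((0 : Int), PySem.List.sorted LB (fun x => x) false)).1
        = pvF LA LB bud := by
    rw [pv_loopB bud (PySem.List.sorted LB (fun x => x) false)
      (PySem.List.sorted_pairwise LB (fun x => x))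
      (PySem.List.sorted LA (fun x => x) false) 0 _
      (PySem.List.sorted_pairwise LA (fun x => x))
      (PySem.List.sorted_pairwise LB (fun x => x))
      (by intro x _; rfl)]
    rw [zero_add]
    rw [List.Perm.sum_eq (List.Perm.map _ (PySem.List.sorted_perm LA (fun x => x) false))]
    unfold pvF
    apply congrArg
    apply List.map_congr_left
    intro x _
    congr 1
    rw [List.Perm.countP_eq _ (PySem.List.sorted_perm LB (fun x => x) false)]
    exact List.countP_congr (by intro a _; simp; omega)
  by_cases hlen : LA.length > LB.length
  · simp only [if_pos hlen]
    rw [pv_Aloop LB LA bud, pv_F_comm, hBside]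
  · simp only [if_neg hlen]
    rw [pv_Aloop LA LB bud, hBside]

-- ===== VERDICT (by name: the statement is the Claim_ definition above) =====
theorem solution_spec : Claim_equal_solution := by
  intro J S Sk T bud _
  unfold Spec_solution
  exact solution_spec' J S Sk T bud
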